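-- pv_equiv track=rewrite | github.com/wmkirby1/CS-VQE | fermions/yaferp/misc/tapering.py | singleSymGenSQG
-- ===== SOURCE A (Python) =====
-- def singleSymGenSQG(term,otherTerms):
--     nonzeroIndices = [x for x,y in enumerate(term) if y != 0]
--     otherNonZeroIndices = [x for thing in otherTerms for x,y in enumerate(thing) if y!= 0]
--     candidates = [x for x in nonzeroIndices if x not in otherNonZeroIndices]
--     assert candidates
--     result = [0] * len(term)
--     result[candidates[0]] = 1
--     return result
-- ===== SOURCE B (Python) =====
-- def singleSymGenSQG(term, otherTerms):
--     for i, v in enumerate(term):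
--         if v != 0 and all(i >= len(o) or o[i] == 0 for o in otherTerms):
--             result = [0] * len(term)
--             result[i] = 1
--             return result
--     assert False
-- ===== Notes on version B (the rewrite author's own statement) =====
-- stated objective: faster
-- what changed: Instead of materialising the lists of all nonzero indices of term and of every other term and filtering candidates by linear-scan list membership, B makes one early-returning left-to-right scan over term, checking the other terms' columns directly and stopping at the first free column.
-- outside the precondition, e.g. on singleSymGenSQG([1], [[1]]): A raises AssertionError, B raises AssertionError
import Mathlib
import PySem

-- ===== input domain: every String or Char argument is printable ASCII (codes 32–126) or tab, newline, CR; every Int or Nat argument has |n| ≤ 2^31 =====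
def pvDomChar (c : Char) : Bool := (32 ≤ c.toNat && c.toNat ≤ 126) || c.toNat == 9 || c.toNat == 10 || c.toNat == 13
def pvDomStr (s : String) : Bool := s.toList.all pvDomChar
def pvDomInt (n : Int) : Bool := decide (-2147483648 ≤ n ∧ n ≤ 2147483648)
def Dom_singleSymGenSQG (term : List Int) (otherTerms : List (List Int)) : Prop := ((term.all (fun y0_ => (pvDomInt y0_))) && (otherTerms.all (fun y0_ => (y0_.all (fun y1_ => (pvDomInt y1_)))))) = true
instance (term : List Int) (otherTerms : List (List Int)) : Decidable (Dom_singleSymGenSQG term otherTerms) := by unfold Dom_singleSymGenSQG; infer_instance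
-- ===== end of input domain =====

-- B replaces A's build-all-nonzero-indices-then-membership-filter by a single early-returning
-- scan over columns that inspects the other terms directly and returns at the first free column (objective: faster; measured).

-- ===== PORT A =====
-- [x for x,y in enumerate(xs) if y != 0], with x the running index (start value given)
def pvNonzeroIndices : List Int → Nat → List Nat
  | [], _ => []
  | y :: ys, x => if y ≠ 0 then x :: pvNonzeroIndices ys (x + 1) else pvNonzeroIndices ys (x + 1)

def singleSymGenSQG (term : List Int) (otherTerms : List (List Int)) : List Int :=
  let nonzeroIndices := pvNonzeroIndices term 0
  let otherNonZeroIndices := otherTerms.flatMap (fun thing => pvNonzeroIndices thing 0)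
  let candidates := nonzeroIndices.filter (fun x => x ∉ otherNonZeroIndices)
  -- `assert candidates` raises when candidates = []; Pre_ excludes exactly those inputs
  let c := candidates.headD 0
  -- result = [0]*len(term); result[c] = 1
  (List.range term.length).map (fun j => if j = c then (1 : Int) else 0)

-- ===== PORT B =====
-- all(i >= len(o) or o[i] == 0 for o in otherTerms)
def pvColFree (otherTerms : List (List Int)) (i : Nat) : Bool :=
  otherTerms.all (fun o => decide (o.length ≤ i) || (o.getD i 0 == 0))

-- the for-loop of B: scan the remaining part of term, i the current index
def pvScan (otherTerms : List (List Int)) (n : Nat) : List Int → Nat → List Int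
  | [], _ => []  -- loop fell through: Python's `assert False` raises; Pre_ excludes this
  | v :: rest, i =>
    if v ≠ 0 ∧ pvColFree otherTerms i then
      List.replicate i 0 ++ (1 : Int) :: List.replicate (n - i - 1) 0
    else pvScan otherTerms n rest (i + 1)

def singleSymGenSQG_alt (term : List Int) (otherTerms : List (List Int)) : List Int :=
  pvScan otherTerms term.length term 0

-- ===== PRECONDITION & SPEC =====
-- Pre_ excludes exactly the inputs on which A's `assert candidates` raises AssertionError
-- (no column is nonzero in term and zero in every other term); B's assert raises there too.
def Pre_singleSymGenSQG (term : List Int) (otherTerms : List (List Int)) : Prop :=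
  ∃ i ∈ List.range term.length, term.getD i 0 ≠ 0 ∧ ∀ o ∈ otherTerms, o.getD i 0 = 0
instance (term : List Int) (otherTerms : List (List Int)) : Decidable (Pre_singleSymGenSQG term otherTerms) := by unfold Pre_singleSymGenSQG; infer_instance

def pvWitness_singleSymGenSQG : List Int × List (List Int) := ([0, 1], [[1, 0], [1]])

def Spec_singleSymGenSQG (term : List Int) (otherTerms : List (List Int)) (out : List Int) : Prop := out = singleSymGenSQG_alt term otherTerms
instance (term : List Int) (otherTerms : List (List Int)) (out : List Int) : Decidable (Spec_singleSymGenSQG term otherTerms out) := by unfold Spec_singleSymGenSQG; infer_instance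

-- ===== CLAIM (what is proved, stated in full; the proofs are below) =====
def Claim_equal_singleSymGenSQG : Prop := ∀ (term : List Int) (otherTerms : List (List Int)), Dom_singleSymGenSQG term otherTerms → Pre_singleSymGenSQG term otherTerms → Spec_singleSymGenSQG term otherTerms (singleSymGenSQG term otherTerms)


-- ===== LEMMAS AND PROOFS =====

-- the per-column predicate both programs decide
def pvQ (term : List Int) (otherTerms : List (List Int)) (i : Nat) : Bool :=
  (term.getD i 0 != 0) && pvColFree otherTerms i

theorem pvNonzeroIndices_eq (ys : List Int) (x : Nat) :
    pvNonzeroIndices ys x =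
      (List.range ys.length).filterMap (fun j => if ys.getD j 0 ≠ 0 then some (x + j) else none) := by
  induction ys generalizing x with
  | nil => simp [pvNonzeroIndices]
  | cons y ys ih =>
    simp only [pvNonzeroIndices, List.length_cons, List.range_succ_eq_map,
      List.filterMap_cons, List.filterMap_map]
    by_cases h : y = 0 <;> simp [h, ih, Nat.add_comm, Nat.add_left_comm]

theorem getD_ne_lt (o : List Int) (x : Nat) (h : o.getD x 0 ≠ 0) : x < o.length := by
  by_contra hx
  simp [List.getD_eq_getElem?_getD, List.getElem?_eq_none (by omega : o.length ≤ x)] at h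

theorem mem_nonzero (o : List Int) (x : Nat) :
    x ∈ pvNonzeroIndices o 0 ↔ o.getD x 0 ≠ 0 := by
  rw [pvNonzeroIndices_eq]
  simp only [List.mem_filterMap, List.mem_range]
  constructor
  · rintro ⟨j, hj, hf⟩
    split at hf
    · rename_i h; cases hf; simpa using h
    · cases hf
  · intro h
    exact ⟨x, getD_ne_lt o x h, by rw [if_pos h, Nat.zero_add]⟩

theorem pvColFree_iff (otherTerms : List (List Int)) (i : Nat) :
    pvColFree otherTerms i = true ↔ ∀ o ∈ otherTerms, o.getD i 0 = 0 := by
  simp only [pvColFree, List.all_eq_true, Bool.or_eq_true, decide_eq_true_eq, beq_iff_eq]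
  refine forall₂_congr (fun o _ => ⟨fun h => ?_, fun h => Or.inr h⟩)
  rcases h with h | h
  · simp [List.getD_eq_getElem?_getD, List.getElem?_eq_none h]
  · exact h

theorem nonzero_filter (ys : List Int) :
    pvNonzeroIndices ys 0 = (List.range ys.length).filter (fun j => ys.getD j 0 != 0) := by
  rw [pvNonzeroIndices_eq, ← List.filterMap_eq_filter]
  congr 1
  funext j
  by_cases h : ys.getD j 0 = 0 <;> simp [Option.guard, h]

theorem candidates_eq (term : List Int) (otherTerms : List (List Int)) :
    ((pvNonzeroIndices term 0).filter
        (fun x => x ∉ otherTerms.flatMap (fun thing => pvNonzeroIndices thing 0))) =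
      (List.range term.length).filter (pvQ term otherTerms) := by
  rw [nonzero_filter, List.filter_filter]
  apply List.filter_congr
  intro x _
  have hmem : (decide (x ∉ otherTerms.flatMap (fun thing => pvNonzeroIndices thing 0))) =
      pvColFree otherTerms x := by
    by_cases hc : ∀ o ∈ otherTerms, o.getD x 0 = 0
    · have h1 : pvColFree otherTerms x = true := (pvColFree_iff _ _).mpr hc
      have h2 : x ∉ otherTerms.flatMap (fun thing => pvNonzeroIndices thing 0) := by
        simp only [List.mem_flatMap, mem_nonzero, not_exists]
        rintro o ⟨ho, hne⟩
        exact hne (hc o ho)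
      simp [h1, h2]
    · have h1 : pvColFree otherTerms x = false := by
        rw [← Bool.not_eq_true, pvColFree_iff]; exact hc
      push Not at hc
      obtain ⟨o, ho, hne⟩ := hc
      have h2 : x ∈ otherTerms.flatMap (fun thing => pvNonzeroIndices thing 0) := by
        simp only [List.mem_flatMap, mem_nonzero]
        exact ⟨o, ho, hne⟩
      simp [h1, h2]
  rw [hmem, pvQ, Bool.and_comm]

theorem drop_head (term : List Int) (i : Nat) (v : Int) (rs : List Int)
    (h : term.drop i = v :: rs) : term.getD i 0 = v ∧ term.drop (i + 1) = rs := by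
  constructor
  · have hd : (term.drop i)[0]? = term[i + 0]? := List.getElem?_drop
    rw [h] at hd
    simp only [List.getElem?_cons_zero, Nat.add_zero] at hd
    simp [List.getD_eq_getElem?_getD, ← hd]
  · rw [← List.drop_drop, h]; rfl

theorem pvScan_eq (otherTerms : List (List Int)) (term : List Int) (n : Nat) :
    ∀ (rest : List Int) (i : Nat), rest = term.drop i →
      pvScan otherTerms n rest i =
        match ((List.range' i rest.length).filter (pvQ term otherTerms)).head? with
        | some c => List.replicate c 0 ++ (1 : Int) :: List.replicate (n - c - 1) 0
        | none => [] := by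
  intro rest
  induction rest with
  | nil => intro i _; simp [pvScan]
  | cons v rs ih =>
    intro i hdrop
    obtain ⟨hv, hrs⟩ := drop_head term i v rs hdrop.symm
    simp only [pvScan, List.length_cons, List.range'_succ, List.filter_cons]
    by_cases hq : pvQ term otherTerms i = true
    · have hcond : (v ≠ 0 ∧ pvColFree otherTerms i = true) := by
        rw [← hv]
        simpa [pvQ] using hq
      rw [if_pos hcond, hq]
      simp
    · have hcond : ¬ (v ≠ 0 ∧ pvColFree otherTerms i = true) := by
        rw [← hv]
        simpa [pvQ] using hq
      rw [if_neg hcond, eq_false_of_ne_true hq]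
      simp only [Bool.false_eq_true, if_false]
      exact ih (i + 1) hrs.symm

theorem oneHot_eq (n c : Nat) (h : c < n) :
    (List.range n).map (fun j => if j = c then (1 : Int) else 0) =
      List.replicate c 0 ++ (1 : Int) :: List.replicate (n - c - 1) 0 := by
  apply List.ext_getElem
  · simp; omega
  · intro i hi hi2
    simp only [List.getElem_map, List.getElem_range]
    rcases lt_trichotomy i c with hc | hc | hc
    · rw [List.getElem_append_left (by simpa using hc)]
      simp [Nat.ne_of_lt hc]
    · subst hc
      rw [List.getElem_append_right (by simp)]
      simp
    · rw [List.getElem_append_right (by simp; omega)]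
      have : i - c ≠ 0 := by omega
      rcases Nat.exists_eq_succ_of_ne_zero this with ⟨k, hk⟩
      simp only [List.length_replicate, hk, List.getElem_cons_succ, List.getElem_replicate]
      rw [if_neg (by omega)]

-- ===== VERDICT (by name: the statement is the Claim_ definition above) =====
theorem singleSymGenSQG_spec : Claim_equal_singleSymGenSQG := by
  intro term otherTerms _ hpre
  unfold Spec_singleSymGenSQG
  simp only [singleSymGenSQG, singleSymGenSQG_alt]
  rw [candidates_eq, pvScan_eq otherTerms term term.length term 0 (by simp)]
  have hrange : List.range' 0 term.length = List.range term.length :=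
    (List.range_eq_range' ..).symm
  rw [hrange]
  obtain ⟨i, hi, hnz, hz⟩ := hpre
  have hqi : pvQ term otherTerms i = true := by
    rw [pvQ, (pvColFree_iff otherTerms i).mpr hz, Bool.and_true]
    exact bne_iff_ne.mpr hnz
  have hmemf : i ∈ (List.range term.length).filter (pvQ term otherTerms) :=
    List.mem_filter.mpr ⟨hi, hqi⟩
  cases hh : ((List.range term.length).filter (pvQ term otherTerms)).head? with
  | none =>
    rw [List.head?_eq_none_iff] at hh
    rw [hh] at hmemf
    cases hmemf
  | some c =>
    have hcm : c ∈ ((List.range term.length).filter (pvQ term otherTerms)).head? := by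
      rw [hh]; rfl
    have hcmem := List.mem_of_mem_head? hcm
    have hclt : c < term.length := List.mem_range.mp (List.mem_filter.mp hcmem).1
    rw [List.headD_eq_head?_getD, hh]
    exact oneHot_eq term.length c hclt
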